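-- pv_equiv track=rewrite | github.com/antonsolomko/snooker-andy | seeding.py | distribution_map
-- ===== SOURCE A (Python) =====
-- def distribution_map(r, reverse = True):
--     res = [0]
--     for g in range(r):
--         nres = []
--         for i in range(2**g):
--             nres.append(res[i])
--             if reverse:
--                 op = 2**(g+1) - res[i] - 1
--             else:
--                 op = 2**g + i
--             nres.append(op)
--         res = nres
--     return res
-- ===== SOURCE B (Python) =====
-- def distribution_map(r, reverse = True):
--     # recursive doubling: one recursive level per round instead of an in-place loop
--     if r <= 0:
--         return [0]
--     prev = distribution_map(r - 1, reverse)
--     if reverse: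
--         return [x for v in prev for x in (v, 2**r - v - 1)]
--     return [x for i, v in enumerate(prev) for x in (v, 2**(r - 1) + i)]
-- ===== Notes on version B (the rewrite author's own statement) =====
-- stated objective: alternative
-- what changed: Replaced A's iterative loop that rebuilds the bracket in a mutable list round by round with a recursion on r that produces each doubling round as a flat-mapped list of (seed, opponent) pairs over the previous round.
import Mathlib
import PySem

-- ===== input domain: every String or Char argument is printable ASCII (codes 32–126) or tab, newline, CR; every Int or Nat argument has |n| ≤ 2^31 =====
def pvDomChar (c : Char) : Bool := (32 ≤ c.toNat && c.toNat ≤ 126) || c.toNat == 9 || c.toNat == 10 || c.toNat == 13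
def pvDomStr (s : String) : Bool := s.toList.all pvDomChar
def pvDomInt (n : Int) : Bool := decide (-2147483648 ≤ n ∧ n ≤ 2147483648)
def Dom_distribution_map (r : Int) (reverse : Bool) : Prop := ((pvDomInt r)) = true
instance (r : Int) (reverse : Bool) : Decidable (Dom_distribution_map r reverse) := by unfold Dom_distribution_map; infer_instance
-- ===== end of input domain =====

-- B replaces A's iterative in-place doubling loop by recursion on r, emitting each
-- doubled round as a flatMap of pairs (objective: alternative decomposition, same cost).

-- ===== PORT A =====
def distribution_map (r : Int) (reverse : Bool) : List Int :=
  (PySem.List.pyRange 0 r 1).foldl (fun res g =>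
    (PySem.List.pyRange 0 ((2:Int)^g.toNat) 1).foldl (fun nres i =>
      -- res[i]: i always lies in range (res has length 2**g), so pyGetD is exact here
      let v := PySem.List.pyGetD res i 0
      let op := if reverse then (2:Int)^((g+1).toNat) - v - 1 else (2:Int)^g.toNat + i
      nres ++ [v] ++ [op]) []) [0]

-- ===== PORT B =====
def distribution_map_alt (r : Int) (reverse : Bool) : List Int :=
  if r ≤ 0 then [0]
  else
    let prev := distribution_map_alt (r - 1) reverse
    if reverse then
      prev.flatMap (fun v => [v, (2:Int)^r.toNat - v - 1])
    else
      (PySem.List.enumerate prev 0).flatMap (fun iv => [iv.2, (2:Int)^((r-1).toNat) + iv.1])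
termination_by r.toNat
decreasing_by omega

-- ===== PRECONDITION & SPEC =====
def Spec_distribution_map (r : Int) (reverse : Bool) (out : List Int) : Prop := out = distribution_map_alt r reverse
instance (r : Int) (reverse : Bool) (out : List Int) : Decidable (Spec_distribution_map r reverse out) := by unfold Spec_distribution_map; infer_instance

-- ===== CLAIM (what is proved, stated in full; the proofs are below) =====
def Claim_equal_distribution_map : Prop := ∀ (r : Int) (reverse : Bool), Dom_distribution_map r reverse → Spec_distribution_map r reverse (distribution_map r reverse)

-- ===== LEMMAS AND PROOFS =====

theorem alt_nonpos (r : Int) (rev : Bool) (h : r ≤ 0) : distribution_map_alt r rev = [0] := by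
  rw [distribution_map_alt]; simp [h]

theorem alt_pos (r : Int) (rev : Bool) (h : ¬ r ≤ 0) :
    distribution_map_alt r rev =
      if rev then
        (distribution_map_alt (r-1) rev).flatMap (fun v => [v, (2:Int)^r.toNat - v - 1])
      else
        (PySem.List.enumerate (distribution_map_alt (r-1) rev) 0).flatMap
          (fun iv => [iv.2, (2:Int)^((r-1).toNat) + iv.1]) := by
  rw [distribution_map_alt]; simp [h]

theorem flatMap_pair_length {α β : Type} (l : List α) (f g : α → β) :
    (l.flatMap (fun v => [f v, g v])).length = 2 * l.length := by
  induction l with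
  | nil => simp
  | cons x xs ih => simp only [List.flatMap_cons, List.length_append, ih, List.length_cons,
      List.length_nil]; omega

theorem alt_length : ∀ (n : Nat) (r : Int), r.toNat = n → ∀ (rev : Bool),
    (distribution_map_alt r rev).length = 2 ^ r.toNat := by
  intro n
  induction n with
  | zero =>
    intro r h rev
    rw [alt_nonpos r rev (by omega), h]
    simp
  | succ n ih =>
    intro r h rev
    have hr : ¬ r ≤ 0 := by omega
    have h1 : (r - 1).toNat = n := by omega
    rw [alt_pos r rev hr]
    cases rev with
    | true =>
      rw [if_pos rfl, flatMap_pair_length (f := fun v => v)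
        (g := fun v => (2:Int)^r.toNat - v - 1), ih (r-1) h1 true, h, h1]
      ring
    | false =>
      rw [if_neg (by simp),
        flatMap_pair_length (l := PySem.List.enumerate (distribution_map_alt (r-1) false) 0)
          (f := fun iv : Int × Int => iv.2)
          (g := fun iv : Int × Int => (2:Int)^((r-1).toNat) + iv.1),
        PySem.List.length_enumerate, ih (r-1) h1 false, h, h1]
      ring

-- the inner loop of A, run over the indices of l, is one flatMap round
theorem step_eq (l : List Int) (c1 c2 : Int) (rev : Bool) :
    (PySem.List.pyRange 0 ((l.length : Int)) 1).foldl (fun nres i =>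
      let v := PySem.List.pyGetD l i 0
      let op := if rev then c1 - v - 1 else c2 + i
      nres ++ [v] ++ [op]) [] =
    (if rev then l.flatMap (fun v => [v, c1 - v - 1])
     else (PySem.List.enumerate l 0).flatMap (fun iv => [iv.2, c2 + iv.1])) := by
  cases rev with
  | true =>
    simp only [reduceIte, List.append_assoc, List.singleton_append]
    rw [PySem.List.foldl_pyRange_zero_pyGetD' l 0 (fun acc v => acc ++ [v, c1 - v - 1]) [],
        PySem.List.foldl_append_eq_flatMap, List.nil_append]
  | false =>
    simp only [Bool.false_eq_true, if_false, List.append_assoc, List.singleton_append]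
    rw [PySem.List.foldl_append_eq_flatMap (fun i => [PySem.List.pyGetD l i 0, c2 + i]) _ [],
        List.nil_append, PySem.List.enumerate_eq_map_pyRange l 0, PySem.List.len_eq,
        List.flatMap_map]

theorem main_eq : ∀ (n : Nat) (r : Int), r.toNat = n → ∀ (rev : Bool),
    distribution_map r rev = distribution_map_alt r rev := by
  intro n
  induction n with
  | zero =>
    intro r h rev
    have hr : r ≤ 0 := by omega
    rw [alt_nonpos r rev hr]
    unfold distribution_map
    rw [PySem.List.pyRange_one_eq_nil hr]
    rfl
  | succ n ih =>
    intro r h rev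
    have hr : ¬ r ≤ 0 := by omega
    have h1 : (r - 1).toNat = n := by omega
    have hsplit : PySem.List.pyRange 0 r 1 = PySem.List.pyRange 0 (r-1) 1 ++ [r-1] := by
      have := PySem.List.pyRange_one_succ_right (a := 0) (b := r - 1) (by omega)
      simpa using this
    have hlen : (((distribution_map_alt (r-1) rev).length : Int)) = (2:Int)^((r-1).toNat) := by
      rw [alt_length ((r-1).toNat) (r-1) rfl rev]
      push_cast
      ring
    unfold distribution_map
    rw [hsplit, List.foldl_append]
    have hprev : (PySem.List.pyRange 0 (r-1) 1).foldl (fun res g =>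
        (PySem.List.pyRange 0 ((2:Int)^g.toNat) 1).foldl (fun nres i =>
          let v := PySem.List.pyGetD res i 0
          let op := if rev then (2:Int)^((g+1).toNat) - v - 1 else (2:Int)^g.toNat + i
          nres ++ [v] ++ [op]) []) [0] = distribution_map_alt (r-1) rev := by
      have := ih (r-1) h1 rev
      unfold distribution_map at this
      exact this
    simp only [List.foldl_cons, List.foldl_nil]
    rw [hprev, alt_pos r rev hr,
        show ((r - 1 + 1 : Int)) = r from by ring, ← hlen,
        step_eq (distribution_map_alt (r-1) rev) ((2:Int)^r.toNat)
          (((distribution_map_alt (r-1) rev).length : Int)) rev]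

-- ===== VERDICT (by name: the statement is the Claim_ definition above) =====
theorem distribution_map_spec : Claim_equal_distribution_map := by
  intro r rev _
  unfold Spec_distribution_map
  exact main_eq r.toNat r rfl rev
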